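-- pv_equiv track=rewrite | github.com/NamanRC/cv-extraction-accio | pipeline/scorer.py | score_college
-- ===== SOURCE A (Python) =====
-- TIER1_COLLEGES = [
--     "indian institute of technology", "iit", "indian institute of science", "iisc",
--     "mit", "stanford", "carnegie mellon", "cmu", "uc berkeley",
--     "university of california, berkeley", "caltech", "georgia tech",
--     "university of texas", "university of washington", "eth zurich",
--     "oxford", "cambridge", "harvard", "princeton", "columbia university",
--     "university of illinois", "bits pilani", "iiit hyderabad",
-- ]
--
-- TIER2_COLLEGES = [
--     "nit", "national institute of technology", "dtu", "delhi technological",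
--     "jadavpur", "vit", "manipal", "thapar", "psg",
--     "university of michigan", "university of toronto", "purdue", "ucla",
--     "nyu", "university of southern california", "usc",
--     "university of maryland", "northeastern",
-- ]
--
-- def _lower(val):
--     return (val or "").lower().strip()
--
-- def score_college(education):
--     best = 0
--     reasons = []
--     for edu in education:
--         college = _lower(edu.get("college"))
--         if not college:
--             continue
--         if any(t in college for t in TIER1_COLLEGES):
--             if best < 15:
--                 best = 15
--                 reasons = [f"Tier-1 college: {edu['college']}"]
--         elif any(t in college for t in TIER2_COLLEGES):
--             if best < 9:
--                 best = 9
--                 reasons = [f"Tier-2 college: {edu['college']}"]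
--         else:
--             if best < 4:
--                 best = 4
--                 reasons = [f"Other college: {edu['college']}"]
--     return best, reasons or ["No education data"]
-- ===== SOURCE B (Python) =====
-- TIER1_COLLEGES = [
--     "indian institute of technology", "iit", "indian institute of science", "iisc",
--     "mit", "stanford", "carnegie mellon", "cmu", "uc berkeley",
--     "university of california, berkeley", "caltech", "georgia tech",
--     "university of texas", "university of washington", "eth zurich",
--     "oxford", "cambridge", "harvard", "princeton", "columbia university",
--     "university of illinois", "bits pilani", "iiit hyderabad",
-- ]
--
-- TIER2_COLLEGES = [
--     "nit", "national institute of technology", "dtu", "delhi technological",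
--     "jadavpur", "vit", "manipal", "thapar", "psg",
--     "university of michigan", "university of toronto", "purdue", "ucla",
--     "nyu", "university of southern california", "usc",
--     "university of maryland", "northeastern",
-- ]
--
-- _LABELS = {15: "Tier-1 college", 9: "Tier-2 college", 4: "Other college"}
--
--
-- def _lower(val):
--     return (val or "").lower().strip()
--
--
-- def _tier(college):
--     if any(t in college for t in TIER1_COLLEGES):
--         return 15
--     if any(t in college for t in TIER2_COLLEGES):
--         return 9
--     return 4
--
--
-- def score_college(education):
--     scored = [(_tier(c), edu) for edu in education if (c := _lower(edu.get("college")))]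
--     best = max((s for s, _ in scored), default=0)
--     if best == 0:
--         return 0, ["No education data"]
--     edu = next(e for s, e in scored if s == best)
--     return best, [f"{_LABELS[best]}: {edu['college']}"]
-- ===== Notes on version B (the rewrite author's own statement) =====
-- stated objective: alternative
-- what changed: A's single loop that mutates best/reasons with per-tier 'if best < k' updates is replaced by a two-pass decomposition: score every entry once into a (score, entry) list, take the max (default 0), then pick the first entry attaining it and render its reason from a score->label table.
import Mathlib
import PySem

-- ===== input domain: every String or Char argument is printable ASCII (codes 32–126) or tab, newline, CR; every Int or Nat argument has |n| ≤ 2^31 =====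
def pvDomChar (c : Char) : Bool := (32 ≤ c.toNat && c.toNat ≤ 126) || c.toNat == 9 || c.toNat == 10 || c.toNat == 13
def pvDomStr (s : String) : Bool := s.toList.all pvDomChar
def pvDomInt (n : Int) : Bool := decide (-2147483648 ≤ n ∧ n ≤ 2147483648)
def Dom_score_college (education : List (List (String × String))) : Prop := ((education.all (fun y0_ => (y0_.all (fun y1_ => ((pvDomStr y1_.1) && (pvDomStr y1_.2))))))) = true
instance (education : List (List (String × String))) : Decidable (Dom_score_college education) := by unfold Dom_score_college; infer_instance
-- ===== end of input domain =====

-- B replaces A's single mutating best/reasons loop by a two-pass decomposition (score every entry, take the max, then pick the first entry attaining it); same results, no speed claim.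

-- ===== PORT A =====
def pvTier1 : List String := ["indian institute of technology", "iit", "indian institute of science", "iisc",
    "mit", "stanford", "carnegie mellon", "cmu", "uc berkeley",
    "university of california, berkeley", "caltech", "georgia tech",
    "university of texas", "university of washington", "eth zurich",
    "oxford", "cambridge", "harvard", "princeton", "columbia university",
    "university of illinois", "bits pilani", "iiit hyderabad"]
def pvTier2 : List String := ["nit", "national institute of technology", "dtu", "delhi technological",
    "jadavpur", "vit", "manipal", "thapar", "psg",
    "university of michigan", "university of toronto", "purdue", "ucla",
    "nyu", "university of southern california", "usc",
    "university of maryland", "northeastern"]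
-- _lower(val) = (val or "").lower().strip(); None and "" are both falsy, so Option.getD "" is exact
def pvLowerHelper (val : Option String) : String := PySem.Str.strip (PySem.Str.lower (val.getD ""))
-- edu['college']: only evaluated when the key is present with a non-blank value, so getD "" never fires
def pvCollegeRaw (edu : List (String × String)) : String := (List.lookup "college" edu).getD ""
def pvStepA (st : Int × List String) (edu : List (String × String)) : Int × List String :=
  let college := pvLowerHelper (List.lookup "college" edu)
  if college = "" then st
  else if pvTier1.any (fun t => PySem.Str.isIn t college) then
    (if st.1 < 15 then ((15 : Int), ["Tier-1 college: " ++ pvCollegeRaw edu]) else st)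
  else if pvTier2.any (fun t => PySem.Str.isIn t college) then
    (if st.1 < 9 then ((9 : Int), ["Tier-2 college: " ++ pvCollegeRaw edu]) else st)
  else
    (if st.1 < 4 then ((4 : Int), ["Other college: " ++ pvCollegeRaw edu]) else st)
def score_college (education : List (List (String × String))) : Int × List String :=
  let st := education.foldl pvStepA (0, [])
  (st.1, if st.2 = [] then ["No education data"] else st.2)

-- ===== PORT B =====
def pvLabels : List (Int × String) := [(15, "Tier-1 college"), (9, "Tier-2 college"), (4, "Other college")]
def pvTierScore (college : String) : Int :=
  if pvTier1.any (fun t => PySem.Str.isIn t college) then 15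
  else if pvTier2.any (fun t => PySem.Str.isIn t college) then 9
  else 4
-- one comprehension entry: if (c := _lower(edu.get("college"))): (tier(c), edu)
def pvScoreEntry (edu : List (String × String)) : Option (Int × List (String × String)) :=
  let c := pvLowerHelper (List.lookup "college" edu)
  if c = "" then none else some (pvTierScore c, edu)
-- f"{_LABELS[best]}: {edu['college']}"
def pvMkReason (s : Int) (edu : List (String × String)) : String :=
  (List.lookup s pvLabels).getD "" ++ ": " ++ pvCollegeRaw edu
def score_college_alt (education : List (List (String × String))) : Int × List String :=
  let scored := education.filterMap pvScoreEntry
  let best := PySem.List.maxD (scored.map (·.1)) id 0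
  if best = 0 then (0, ["No education data"])
  else
    match scored.find? (fun p => p.1 == best) with
    | some p => (best, [pvMkReason best p.2])
    | none => (best, [])   -- unreachable: best ≠ 0 means some entry attains best

-- ===== PRECONDITION & SPEC =====
def Spec_score_college (education : List (List (String × String))) (out : Int × List String) : Prop := out = score_college_alt education
instance (education : List (List (String × String))) (out : Int × List String) : Decidable (Spec_score_college education out) := by unfold Spec_score_college; infer_instance

-- ===== CLAIM (what is proved, stated in full; the proofs are below) =====
def Claim_equal_score_college : Prop := ∀ (education : List (List (String × String))), Dom_score_college education → Spec_score_college education (score_college education)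

-- ===== LEMMAS AND PROOFS =====

-- best score of the processed list, in foldl-max form (proof-side mirror of B's max(default=0))
def pvBest (l : List (List (String × String))) : Int :=
  ((l.filterMap pvScoreEntry).map (·.1)).foldl max 0

theorem pv_foldl_max_max (xs : List Int) (a b : Int) :
    xs.foldl max (max a b) = max a (xs.foldl max b) := by
  induction xs generalizing b with
  | nil => rfl
  | cons x t ih =>
      simp only [List.foldl_cons, max_assoc]
      exact ih (max b x)

theorem pv_init_le_foldl_max (xs : List Int) (a : Int) : a ≤ xs.foldl max a := by
  induction xs generalizing a with
  | nil => simp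
  | cons x t ih => exact le_trans (le_max_left _ _) (ih (max a x))

theorem pv_foldl_max_zero_mem (xs : List Int) (h : 0 < xs.foldl max 0) :
    xs.foldl max 0 ∈ xs := by
  induction xs with
  | nil => simp at h
  | cons x t ih =>
      have hc : (x :: t).foldl max 0 = max x (t.foldl max 0) := by
        simp only [List.foldl_cons]
        rw [max_comm (0 : Int) x, pv_foldl_max_max]
      rw [hc] at h ⊢
      rcases le_total (t.foldl max 0) x with hle | hle
      · rw [max_eq_left hle]; exact List.mem_cons_self
      · rw [max_eq_right hle] at h ⊢
        exact List.mem_cons_of_mem _ (ih (by omega))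

-- B's max(… , default=0) equals the foldl-max mirror, for nonnegative scores
theorem pv_max?_foldl (xs : List Int) (a : Int) :
    PySem.List.max? (a :: xs) (id : Int → Int) = some (xs.foldl max a) := by
  induction xs generalizing a with
  | nil => simp [PySem.List.max?]
  | cons x t ih =>
      have h1 : PySem.List.max? (a :: x :: t) (id : Int → Int)
          = PySem.List.max? (max a x :: t) (id : Int → Int) := by
        simp only [PySem.List.max?, List.foldl_cons, id]
        congr 1
        by_cases h : a < x
        · simp [h, max_eq_right (le_of_lt h)]
        · simp [h, max_eq_left (not_lt.1 h)]
      rw [h1, ih]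
      simp

theorem pv_tierScore_pos (c : String) : 0 < pvTierScore c := by
  unfold pvTierScore; split_ifs <;> norm_num

theorem pv_scoreEntry_none_iff (edu : List (String × String)) :
    pvScoreEntry edu = none ↔ pvLowerHelper (List.lookup "college" edu) = "" := by
  simp only [pvScoreEntry]
  by_cases hc : pvLowerHelper (List.lookup "college" edu) = ""
  · rw [if_pos hc]; simp [hc]
  · rw [if_neg hc]; simp [hc]

theorem pv_scoreEntry_some {edu : List (String × String)} {s : Int} {e : List (String × String)}
    (h : pvScoreEntry edu = some (s, e)) :
    pvLowerHelper (List.lookup "college" edu) ≠ "" ∧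
      s = pvTierScore (pvLowerHelper (List.lookup "college" edu)) ∧ e = edu ∧ 0 < s := by
  simp only [pvScoreEntry] at h
  by_cases hc : pvLowerHelper (List.lookup "college" edu) = ""
  · rw [if_pos hc] at h; cases h
  · rw [if_neg hc] at h
    rw [Option.some.injEq, Prod.mk.injEq] at h
    exact ⟨hc, h.1.symm, h.2.symm, h.1 ▸ pv_tierScore_pos _⟩

-- A's loop body, phrased through B's per-entry score
theorem pv_stepA_none (st : Int × List String) {edu : List (String × String)}
    (hse : pvScoreEntry edu = none) : pvStepA st edu = st := by
  have hc := (pv_scoreEntry_none_iff edu).1 hse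
  simp [pvStepA, hc]

theorem pv_stepA_some (st : Int × List String) {edu : List (String × String)} {s : Int}
    {e : List (String × String)} (hse : pvScoreEntry edu = some (s, e)) :
    pvStepA st edu = if st.1 < s then (s, [pvMkReason s e]) else st := by
  obtain ⟨hc, hs, he, -⟩ := pv_scoreEntry_some hse
  rw [he]
  simp only [pvStepA]
  rw [if_neg hc]
  by_cases h1 : pvTier1.any (fun t => PySem.Str.isIn t (pvLowerHelper (List.lookup "college" edu))) = true
  · have hs15 : s = 15 := by rw [hs]; simp only [pvTierScore]; rw [if_pos h1]
    rw [hs15, if_pos h1]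
    have hmk : pvMkReason 15 edu = "Tier-1 college: " ++ pvCollegeRaw edu := rfl
    rw [hmk]
  · rw [if_neg h1]
    by_cases h2 : pvTier2.any (fun t => PySem.Str.isIn t (pvLowerHelper (List.lookup "college" edu))) = true
    · have hs9 : s = 9 := by rw [hs]; simp only [pvTierScore]; rw [if_neg h1, if_pos h2]
      rw [hs9, if_pos h2]
      have hmk : pvMkReason 9 edu = "Tier-2 college: " ++ pvCollegeRaw edu := rfl
      rw [hmk]
    · have hs4 : s = 4 := by rw [hs]; simp only [pvTierScore]; rw [if_neg h1, if_neg h2]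
      rw [hs4, if_neg h2]
      have hmk : pvMkReason 4 edu = "Other college: " ++ pvCollegeRaw edu := rfl
      rw [hmk]

theorem pv_best_nonneg (l : List (List (String × String))) : 0 ≤ pvBest l :=
  pv_init_le_foldl_max _ 0

theorem pv_best_cons {edu : List (String × String)} {s : Int} {e : List (String × String)}
    (l : List (List (String × String))) (h : pvScoreEntry edu = some (s, e)) :
    pvBest (edu :: l) = max s (pvBest l) := by
  unfold pvBest
  simp only [List.filterMap_cons, h, List.map_cons, List.foldl_cons]
  rw [max_comm (0 : Int) s, pv_foldl_max_max]

theorem pv_best_cons_none {edu : List (String × String)}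
    (l : List (List (String × String))) (h : pvScoreEntry edu = none) :
    pvBest (edu :: l) = pvBest l := by
  unfold pvBest
  simp [h]

-- a positive best is attained, so B's find? succeeds
theorem pv_best_attained (l : List (List (String × String))) (h : 0 < pvBest l) :
    ∃ p, (l.filterMap pvScoreEntry).find? (fun p => p.1 == pvBest l) = some p ∧ p.1 = pvBest l := by
  have hmem : pvBest l ∈ (l.filterMap pvScoreEntry).map (·.1) := pv_foldl_max_zero_mem _ h
  rcases List.mem_map.1 hmem with ⟨p, hp, hps⟩
  have hex : ∃ q ∈ l.filterMap pvScoreEntry, (fun p => p.1 == pvBest l) q = true :=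
    ⟨p, hp, by simp [hps]⟩
  have hsome : ((l.filterMap pvScoreEntry).find? (fun p => p.1 == pvBest l)).isSome :=
    List.find?_isSome.2 hex
  rcases Option.isSome_iff_exists.1 hsome with ⟨q, hq⟩
  refine ⟨q, hq, ?_⟩
  have := List.find?_some hq
  simpa using this

-- every per-entry score is positive
theorem pv_scores_pos (l : List (List (String × String))) :
    ∀ x ∈ (l.filterMap pvScoreEntry).map (·.1), 0 < x := by
  intro x hx
  rcases List.mem_map.1 hx with ⟨p, hp, rfl⟩
  rcases List.mem_filterMap.1 hp with ⟨edu, -, hpe⟩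
  rcases p with ⟨s, e⟩
  exact (pv_scoreEntry_some hpe).2.2.2

-- B's max(…, default=0) equals the foldl-max mirror
theorem pv_maxD_eq (l : List (List (String × String))) :
    PySem.List.maxD ((l.filterMap pvScoreEntry).map (·.1)) id 0 = pvBest l := by
  have hpos := pv_scores_pos l
  unfold pvBest
  rcases hF : (l.filterMap pvScoreEntry).map (·.1) with _ | ⟨x, xs⟩
  · rw [hF]; simp [PySem.List.maxD, PySem.List.max?]
  · rw [hF]
    have hx : 0 < x := hpos x (hF ▸ List.mem_cons_self)
    simp only [PySem.List.maxD]
    rw [pv_max?_foldl]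
    simp only [Option.getD_some, List.foldl_cons]
    rw [max_eq_right (le_of_lt hx)]

-- the central characterisation of A's fold
theorem pv_foldA (l : List (List (String × String))) (b : Int) (r : List String) (hb : 0 ≤ b) :
    l.foldl pvStepA (b, r) =
      if pvBest l ≤ b then (b, r)
      else ((l.filterMap pvScoreEntry).find? (fun p => p.1 == pvBest l)).elim (b, r)
             (fun p => (pvBest l, [pvMkReason p.1 p.2])) := by
  induction l generalizing b r with
  | nil =>
      have h0 : pvBest ([] : List (List (String × String))) = 0 := rfl
      rw [h0, if_pos hb]
      rfl
  | cons edu t ih =>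
      rcases hse : pvScoreEntry edu with _ | ⟨s, e⟩
      · rw [List.foldl_cons, pv_stepA_none (b, r) hse, ih b r hb,
           pv_best_cons_none t hse, List.filterMap_cons_none hse]
      · have hpos : 0 < s := (pv_scoreEntry_some hse).2.2.2
        rw [List.foldl_cons, pv_stepA_some (b, r) hse, pv_best_cons t hse,
           List.filterMap_cons_some hse]
        by_cases hbs : b < s
        · rw [if_pos (show (b, r).1 < s from hbs)]
          rw [ih s [pvMkReason s e] (le_of_lt (lt_of_le_of_lt hb hbs))]
          rcases le_or_gt (pvBest t) s with hts | hts
          · rw [max_eq_left hts, if_pos hts, if_neg (by omega : ¬ s ≤ b)]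
            rw [List.find?_cons_of_pos (by simp)]
            rfl
          · rw [max_eq_right (le_of_lt hts), if_neg (not_le.2 hts),
               if_neg (by omega : ¬ pvBest t ≤ b)]
            rw [List.find?_cons_of_neg (by simp; omega)]
            rcases pv_best_attained t (lt_trans hpos hts) with ⟨q, hq, -⟩
            rw [hq]
            rfl
        · have hsb : s ≤ b := not_lt.1 hbs
          rw [if_neg (show ¬ (b, r).1 < s from hbs)]
          rw [ih b r hb]
          rcases le_or_gt (pvBest t) b with htb | htb
          · rw [if_pos htb, if_pos (max_le hsb htb)]
          · have hsMt : s < pvBest t := lt_of_le_of_lt hsb htb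
            rw [max_eq_right (le_of_lt hsMt), if_neg (not_le.2 htb),
               if_neg (not_le.2 htb)]
            rw [List.find?_cons_of_neg (by simp; omega)]

-- ===== VERDICT (by name: the statement is the Claim_ definition above) =====
theorem score_college_spec : Claim_equal_score_college := by
  intro l _
  unfold Spec_score_college
  have h := pv_foldA l 0 [] le_rfl
  by_cases hb0 : pvBest l ≤ 0
  · have h0 : pvBest l = 0 := le_antisymm hb0 (pv_best_nonneg l)
    simp only [score_college, score_college_alt]
    rw [h, if_pos hb0, pv_maxD_eq, h0]
    simp
  · have hpos : 0 < pvBest l := not_le.1 hb0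
    rcases pv_best_attained l hpos with ⟨q, hq, hq1⟩
    simp only [score_college, score_college_alt]
    rw [h, if_neg hb0, pv_maxD_eq, hq]
    rw [if_neg (by omega : ¬ pvBest l = 0)]
    simp only [Option.elim]
    rw [hq1]
    simp
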